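-- pv_equiv track=rewrite | github.com/Hoekri/Hexagonal-2048 | main.py | collapseRowFibonacci
-- ===== SOURCE A (Python) =====
-- def collapseRowFibonacci(row:list[int]):
--     change = False
--     emptyIndex = 0
--     lastNumber = None
--     lastNumberIndex = None
--     for i in range(len(row)):
--         if row[i] == 0 and lastNumber == 0:
--             row[lastNumberIndex] = 1
--             row[i] = -1
--             emptyIndex = lastNumberIndex + 1
--             lastNumber = None
--             lastNumberIndex = None
--             change = True
--         elif row[i] >= 0 and lastNumber!=None and abs(row[i] - lastNumber) == 1:
--             row[lastNumberIndex] = max(row[i], lastNumber) + 1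
--             row[i] = -1
--             emptyIndex = lastNumberIndex + 1
--             lastNumber = None
--             lastNumberIndex = None
--             change = True
--         elif row[i] != -1 and i != emptyIndex:
--             row[emptyIndex] = row[i]
--             lastNumber = row[emptyIndex]
--             lastNumberIndex = emptyIndex
--             row[i] = -1
--             emptyIndex += 1
--             change = True
--         elif row[i] != -1 and i == emptyIndex:
--             emptyIndex += 1
--             lastNumberIndex = i
--             lastNumber = row[i]
--     return row, change
-- ===== SOURCE B (Python) =====
-- def collapseRowFibonacci(row: list[int]):
--     vals = [x for x in row if x != -1]
--     stack = []
--     locked = False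
--     for cur in vals:
--         if stack and not locked and ((stack[-1] == 0 and cur == 0)
--                                      or (cur >= 0 and abs(cur - stack[-1]) == 1)):
--             stack[-1] = max(cur, stack[-1]) + 1
--             locked = True
--         else:
--             stack.append(cur)
--             locked = False
--     out = stack + [-1] * (len(row) - len(stack))
--     change = out != row
--     row[:] = out
--     return row, change
-- ===== Notes on version B (the rewrite author's own statement) =====
-- stated objective: simpler
-- what changed: A mutates the row in place while juggling emptyIndex/lastNumber/lastNumberIndex bookkeeping; B first compacts the non-empty cells, folds them through a merge stack with a locked-top flag, then pads with -1 and sets change = output != input.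
import Mathlib
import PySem

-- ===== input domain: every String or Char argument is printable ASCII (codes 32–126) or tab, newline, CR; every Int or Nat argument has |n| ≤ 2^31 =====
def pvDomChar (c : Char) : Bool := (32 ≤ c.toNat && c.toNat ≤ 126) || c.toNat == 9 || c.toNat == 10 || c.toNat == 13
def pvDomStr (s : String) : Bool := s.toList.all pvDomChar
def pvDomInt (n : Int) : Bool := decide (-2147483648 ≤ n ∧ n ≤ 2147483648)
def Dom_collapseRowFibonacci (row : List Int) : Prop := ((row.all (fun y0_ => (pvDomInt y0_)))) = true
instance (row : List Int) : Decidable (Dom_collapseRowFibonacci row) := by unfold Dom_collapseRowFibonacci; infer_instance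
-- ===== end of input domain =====

-- B rewrites A's in-place index-juggling loop as compact-then-fold over a merge stack,
-- padding with -1 and computing `change` as output ≠ input (objective: simpler).
-- Both Pythons mutate `row` in place; the equivalence proved here is about the return value.

-- ===== PORT A =====
-- loop body of A: state = (row, change, emptyIndex, lastNumber, lastNumberIndex)
def stepA (s : List Int × Bool × Nat × Option Int × Option Nat) (i : Nat) :
    List Int × Bool × Nat × Option Int × Option Nat :=
  let r := s.1
  let change := s.2.1
  let e := s.2.2.1
  let ln := s.2.2.2.1
  let li := s.2.2.2.2
  let ri := r.getD i 0
  if ri = 0 ∧ ln = some 0 then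
    ((r.set (li.getD 0) 1).set i (-1), true, li.getD 0 + 1, none, none)
  else if 0 ≤ ri ∧ ln ≠ none ∧ (ri - ln.getD 0).natAbs = 1 then
    ((r.set (li.getD 0) (max ri (ln.getD 0) + 1)).set i (-1), true, li.getD 0 + 1, none, none)
  else if ri ≠ -1 ∧ i ≠ e then
    (((r.set e ri).set i (-1)), true, e + 1, some ((r.set e ri).getD e 0), some e)
  else if ri ≠ -1 ∧ i = e then
    (r, change, e + 1, some ri, some i)
  else
    (r, change, e, ln, li)

def collapseRowFibonacci (row : List Int) : List Int × Bool :=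
  let s := (List.range row.length).foldl stepA (row, false, 0, none, none)
  (s.1, s.2.1)

-- ===== PORT B =====
-- fold body of B: state = (stack, locked-top flag)
def stepB (st : List Int × Bool) (cur : Int) : List Int × Bool :=
  let stack := st.1
  let locked := st.2
  match stack.getLast? with
  | some top =>
      if locked = false ∧ ((top = 0 ∧ cur = 0) ∨ (0 ≤ cur ∧ (cur - top).natAbs = 1)) then
        (stack.dropLast ++ [max cur top + 1], true)
      else
        (stack ++ [cur], false)
  | none => ([cur], false)

def collapseRowFibonacci_alt (row : List Int) : List Int × Bool :=
  let vals := row.filter (fun x => x ≠ -1)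
  let st := vals.foldl stepB ([], false)
  let out := st.1 ++ List.replicate (row.length - st.1.length) (-1)
  (out, decide (out ≠ row))

-- ===== PRECONDITION & SPEC =====
def Spec_collapseRowFibonacci (row : List Int) (out : List Int × Bool) : Prop := out = collapseRowFibonacci_alt row
instance (row : List Int) (out : List Int × Bool) : Decidable (Spec_collapseRowFibonacci row out) := by unfold Spec_collapseRowFibonacci; infer_instance

-- ===== CLAIM (what is proved, stated in full; the proofs are below) =====
def Claim_equal_collapseRowFibonacci : Prop := ∀ (row : List Int), Dom_collapseRowFibonacci row → Spec_collapseRowFibonacci row (collapseRowFibonacci row)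

-- ===== LEMMAS AND PROOFS =====

-- the A-loop state reconstructed from B's stack after processing the first i cells
def mkState (row : List Int) (i : Nat) : List Int × Bool × Nat × Option Int × Option Nat :=
  let st := ((row.take i).filter (fun x => x ≠ -1)).foldl stepB ([], false)
  let S := st.1
  let locked := st.2
  (S ++ List.replicate (i - S.length) (-1) ++ row.drop i,
   decide (S ++ List.replicate (i - S.length) (-1) ≠ row.take i),
   S.length,
   (if locked then none else S.getLast?),
   (if locked then none else if S.isEmpty then none else some (S.length - 1)))

lemma stepB_len_le (st : List Int × Bool) (cur : Int) :
    (stepB st cur).1.length ≤ st.1.length + 1 := by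
  obtain ⟨S, locked⟩ := st
  unfold stepB
  simp only
  rcases hS : S.getLast? with _ | top
  · simp
  · have hne : S ≠ [] := by rintro rfl; simp at hS
    by_cases hc : locked = false ∧ (top = 0 ∧ cur = 0 ∨ 0 ≤ cur ∧ (cur - top).natAbs = 1) <;>
      simp [hc, List.length_dropLast, Nat.sub_add_cancel (List.length_pos_of_ne_nil hne)]

lemma foldB_len_le (l : List Int) : ∀ st : List Int × Bool,
    ((l.foldl stepB st).1).length ≤ st.1.length + l.length := by
  induction l with
  | nil => simp
  | cons x xs ih =>
      intro st
      simp only [List.foldl_cons]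
      calc ((xs.foldl stepB (stepB st x)).1).length ≤ (stepB st x).1.length + xs.length := ih _
        _ ≤ st.1.length + 1 + xs.length := by have := stepB_len_le st x; omega
        _ = st.1.length + (x :: xs).length := by simp; omega

-- a compacted prefix padded with at least one -1 never equals a prefix ending in a non-(-1) cell
lemma ne_pad_concat (S pre : List Int) (m : Nat) (a : Int) (ha : a ≠ -1) :
    S ++ List.replicate (m+1) (-1 : Int) ≠ pre ++ [a] := by
  intro h
  rw [List.replicate_succ', ← List.append_assoc] at h
  have h2 := congrArg List.getLast? h
  rw [List.getLast?_concat, List.getLast?_concat] at h2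
  exact ha (by injection h2 with h3; omega)

lemma rep_shift (m : Nat) (x : Int) (t : List Int) :
    List.replicate m x ++ x :: t = List.replicate (m+1) x ++ t := by
  simp [List.replicate_succ', List.append_assoc]

lemma mkState_eq (row : List Int) (i : Nat) (S : List Int) (locked : Bool)
    (h : ((row.take i).filter (fun x => x ≠ -1)).foldl stepB ([], false) = (S, locked)) :
    mkState row i =
      (S ++ List.replicate (i - S.length) (-1) ++ row.drop i,
       decide (S ++ List.replicate (i - S.length) (-1) ≠ row.take i),
       S.length,
       (if locked then none else S.getLast?),
       (if locked then none else if S.isEmpty then none else some (S.length - 1))) := by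
  simp only [mkState]
  rw [h]

lemma step_main (row : List Int) (i : Nat) (hi : i < row.length) :
    stepA (mkState row i) i = mkState row (i + 1) := by
  rcases hst : ((row.take i).filter (fun x => x ≠ -1)).foldl stepB ([], false) with ⟨S, locked⟩
  have hk : S.length ≤ i := by
    have h1 := foldB_len_le ((row.take i).filter (fun x => x ≠ -1)) ([], false)
    rw [hst] at h1
    have h2 := List.length_filter_le (fun x => decide (x ≠ -1)) (row.take i)
    have h3 : (row.take i).length ≤ i := by simp
    simp only [List.length_nil] at h1
    omega
  have hmk := mkState_eq row i S locked hst
  have ht1 : row.take (i+1) = row.take i ++ [row[i]] := by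
    rw [List.take_add_one]
    simp [List.getElem?_eq_getElem hi]
  have hd : row.drop i = row[i] :: row.drop (i+1) := List.drop_eq_getElem_cons hi
  have hget : (S ++ List.replicate (i - S.length) (-1) ++ row.drop i).getD i 0 = row[i] := by
    have hlen : (S ++ List.replicate (i - S.length) (-1 : Int)).length = i := by simp; omega
    rw [List.getD, List.getElem?_append_right (by omega), hlen, Nat.sub_self, hd]
    rfl
  rw [hmk]
  by_cases hri : row[i] = -1
  · -- the cell is empty: A skips, B's stack is unchanged
    have hst' : ((row.take (i+1)).filter (fun x => x ≠ -1)).foldl stepB ([], false) = (S, locked) := by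
      rw [ht1, List.filter_append]
      have hf : List.filter (fun x => decide (x ≠ -1)) [row[i]] = [] := by simp [hri]
      rw [hf, List.append_nil, hst]
    have hrep : i + 1 - S.length = (i - S.length) + 1 := by omega
    simp only [stepA, hget, hri]
    rw [if_neg (by simp), if_neg (by simp), if_neg (by simp), if_neg (by simp)]
    rw [mkState_eq row (i+1) S locked hst']
    refine Prod.ext ?_ (Prod.ext ?_ rfl)
    · simp only [hrep, hd, hri]
      rw [List.append_assoc, List.append_assoc, rep_shift]
    · simp only [ht1, hrep, List.replicate_succ', hri]
      apply decide_eq_decide.mpr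
      rw [← List.append_assoc]
      exact (not_congr (List.append_left_inj _)).symm
  · -- the cell holds a number
    have hfilter : List.filter (fun x => decide (x ≠ -1)) [row[i]] = [row[i]] := by
      simp [hri]
    have hfold1 : ((row.take (i+1)).filter (fun x => x ≠ -1)).foldl stepB ([], false)
        = stepB (S, locked) row[i] := by
      rw [ht1, List.filter_append, hfilter, List.foldl_append, hst]
      rfl
    by_cases hmerge : locked = false ∧ ∃ T top, S = T ++ [top] ∧
        ((top = 0 ∧ row[i] = 0) ∨ (0 ≤ row[i] ∧ (row[i] - top).natAbs = 1))
    · -- merge step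
      obtain ⟨hlock, T, top, rfl, hC⟩ := hmerge
      subst hlock
      have hst2 : ((row.take (i+1)).filter (fun x => x ≠ -1)).foldl stepB ([], false)
          = (T ++ [max row[i] top + 1], true) := by
        rw [hfold1]
        unfold stepB
        simp only [List.getLast?_concat]
        rw [if_pos (by exact ⟨by simp, hC⟩)]
        simp
      rw [mkState_eq row (i+1) _ _ hst2]
      have hmk2 : (if (false : Bool) = true then none else (T ++ [top]).getLast?) = some top := by
        simp
      have hmk3 : (if (false : Bool) = true then (none : Option Nat)
          else if (T ++ [top]).isEmpty = true then none else some ((T ++ [top]).length - 1))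
          = some T.length := by
        simp
      rw [hmk2, hmk3]
      have hlen1 : (T ++ [top]).length = T.length + 1 := by simp
      have hrep : i + 1 - (T ++ [max row[i] top + 1]).length = (i - (T ++ [top]).length) + 1 := by
        rw [hlen1] at hk
        simp only [List.length_append, List.length_cons, List.length_nil]
        omega
      have hsetlist : ∀ v : Int,
          ((T ++ [top] ++ List.replicate (i - (T ++ [top]).length) (-1) ++ row.drop i).set T.length v).set i (-1)
          = T ++ [v] ++ List.replicate (i + 1 - (T ++ [max row[i] top + 1]).length) (-1) ++ row.drop (i+1) := by
        intro v
        have e1 : (T ++ [top] ++ List.replicate (i - (T ++ [top]).length) (-1) ++ row.drop i).set T.length v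
            = T ++ [v] ++ List.replicate (i - (T ++ [top]).length) (-1) ++ row.drop i := by
          rw [List.set_append_left _ _ (by simp only [List.length_append, List.length_cons, List.length_nil, List.length_replicate]; omega), List.set_append_left _ _ (by simp),
            List.set_append_right _ _ (by simp), Nat.sub_self]
          rfl
        rw [e1, hrep]
        have hlen3 : ((T ++ [v]) ++ List.replicate (i - (T ++ [top]).length) (-1 : Int)).length = i := by
          rw [hlen1] at hk
          simp only [List.length_append, List.length_cons, List.length_nil, List.length_replicate]
          omega
        rw [List.set_append_right _ _ (by rw [hlen3]), hlen3, Nat.sub_self, hd]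
        simp only [List.set_cons_zero]
        rw [List.append_assoc, List.append_assoc, rep_shift]
        simp [List.append_assoc]
      have hchange : (true : Bool) =
          decide (T ++ [max row[i] top + 1] ++
            List.replicate (i + 1 - (T ++ [max row[i] top + 1]).length) (-1) ≠ row.take (i+1)) := by
        rw [ht1, hrep]
        exact (decide_eq_true (ne_pad_concat _ _ _ _ hri)).symm
      simp only [stepA, hget, Option.getD_some]
      by_cases hb1 : row[i] = 0 ∧ top = 0
      · rw [if_pos ⟨hb1.1, by rw [hb1.2]⟩]
        have hv : max row[i] top + 1 = 1 := by rw [hb1.1, hb1.2]; norm_num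
        refine Prod.ext ?_ (Prod.ext ?_ (Prod.ext ?_ rfl))
        · rw [hsetlist 1, hv]
        · exact hchange
        · simp
      · have hC2 : 0 ≤ row[i] ∧ (row[i] - top).natAbs = 1 := by tauto
        rw [if_neg (by
          rintro ⟨h0, hsome⟩
          exact hb1 ⟨h0, by injection hsome⟩)]
        rw [if_pos ⟨hC2.1, by simp, hC2.2⟩]
        refine Prod.ext ?_ (Prod.ext ?_ (Prod.ext ?_ rfl))
        · exact hsetlist _
        · exact hchange
        · simp
    · -- push step
      have hpush : stepB (S, locked) row[i] = (S ++ [row[i]], false) := by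
        unfold stepB
        simp only
        rcases List.eq_nil_or_concat S with rfl | ⟨T, top, hTS⟩
        · rfl
        · rw [List.concat_eq_append] at hTS
          subst hTS
          have hcond : ¬(locked = false ∧ (top = 0 ∧ row[i] = 0 ∨ 0 ≤ row[i] ∧ (row[i] - top).natAbs = 1)) := by
            rintro ⟨h1, h2⟩
            exact hmerge ⟨h1, T, top, rfl, h2⟩
          simp [hcond]
      have hnb1 : ¬(row[i] = 0 ∧ (if locked = true then (none : Option Int) else S.getLast?) = some 0) := by
        rintro ⟨h0, hsome⟩
        cases locked
        · rcases List.eq_nil_or_concat S with rfl | ⟨T, top, hTS⟩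
          · simp at hsome
          · rw [List.concat_eq_append] at hTS
            subst hTS
            rw [if_neg (by simp), List.getLast?_concat] at hsome
            exact hmerge ⟨rfl, T, top, rfl, Or.inl ⟨Option.some.inj hsome, h0⟩⟩
        · simp at hsome
      have hnb2 : ¬(0 ≤ row[i] ∧ (if locked = true then (none : Option Int) else S.getLast?) ≠ none ∧
          (row[i] - (if locked = true then (none : Option Int) else S.getLast?).getD 0).natAbs = 1) := by
        rintro ⟨h0, hne, habs⟩
        cases locked
        · rcases List.eq_nil_or_concat S with rfl | ⟨T, top, hTS⟩
          · simp at hne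
          · rw [List.concat_eq_append] at hTS
            subst hTS
            rw [if_neg (by simp), List.getLast?_concat] at habs
            simp only [Option.getD_some] at habs
            exact hmerge ⟨rfl, T, top, rfl, Or.inr ⟨h0, habs⟩⟩
        · simp at hne
      have hst2 : ((row.take (i+1)).filter (fun x => x ≠ -1)).foldl stepB ([], false)
          = (S ++ [row[i]], false) := by rw [hfold1, hpush]
      rw [mkState_eq row (i+1) _ _ hst2]
      simp only [stepA, hget]
      rw [if_neg hnb1, if_neg hnb2]
      by_cases hie : i = S.length
      · -- the number is already in place: branch 4
        rw [if_neg (by rintro ⟨_, hne⟩; exact hne hie), if_pos ⟨hri, hie⟩]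
        have hrep0 : i - S.length = 0 := by omega
        have hrep0' : i + 1 - (S ++ [row[i]]).length = 0 := by simp; omega
        refine Prod.ext ?_ (Prod.ext ?_ (Prod.ext ?_ (Prod.ext ?_ ?_)))
        · rw [hrep0, hrep0', hd]
          simp
        · rw [hrep0, hrep0', ht1]
          apply decide_eq_decide.mpr
          simp only [List.replicate_zero, List.append_nil]
          exact (not_congr (List.append_left_inj _)).symm
        · simp
        · rw [if_neg (by simp), List.getLast?_concat]
        · rw [if_neg (by simp), if_neg (by simp)]
          simp [hie]
      · -- the number moves left into the gap: branch 3
        rw [if_pos ⟨hri, hie⟩]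
        have hklt : S.length < i := by omega
        have hrepS : i - S.length = (i - S.length - 1) + 1 := by omega
        have e1 : (S ++ List.replicate (i - S.length) (-1) ++ row.drop i).set S.length row[i]
            = S ++ [row[i]] ++ List.replicate (i - S.length - 1) (-1) ++ row.drop i := by
          rw [List.set_append_left _ _ (by simp only [List.length_append, List.length_replicate]; omega), List.set_append_right _ _ (by simp),
            Nat.sub_self, hrepS, List.replicate_succ]
          simp only [List.set_cons_zero]
          simp [List.append_assoc]
        rw [e1]
        have hgetk : (S ++ [row[i]] ++ List.replicate (i - S.length - 1) (-1) ++ row.drop i).getD S.length 0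
            = row[i] := by
          rw [List.getD, List.append_assoc, List.append_assoc,
            List.getElem?_append_right (le_refl S.length), Nat.sub_self]
          rfl
        have hlenp : ((S ++ [row[i]]) ++ List.replicate (i - S.length - 1) (-1 : Int)).length = i := by
          simp only [List.length_append, List.length_cons, List.length_nil, List.length_replicate]
          omega
        have hrep' : i + 1 - (S ++ [row[i]]).length = (i - S.length - 1) + 1 := by simp; omega
        have e2 : (S ++ [row[i]] ++ List.replicate (i - S.length - 1) (-1) ++ row.drop i).set i (-1)
            = S ++ [row[i]] ++ List.replicate (i + 1 - (S ++ [row[i]]).length) (-1) ++ row.drop (i+1) := by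
          rw [List.set_append_right _ _ (by rw [hlenp]), hlenp, Nat.sub_self, hd]
          simp only [List.set_cons_zero]
          rw [hrep', List.append_assoc, List.append_assoc, rep_shift]
          simp [List.append_assoc]
        refine Prod.ext ?_ (Prod.ext ?_ (Prod.ext ?_ (Prod.ext ?_ ?_)))
        · exact e2
        · rw [ht1, hrep']
          exact (decide_eq_true (ne_pad_concat _ _ _ _ hri)).symm
        · simp
        · rw [hgetk, if_neg (by simp), List.getLast?_concat]
        · rw [if_neg (by simp), if_neg (by simp)]
          simp

lemma invA (row : List Int) (i : Nat) (h : i ≤ row.length) :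
    (List.range i).foldl stepA (row, false, 0, none, none) = mkState row i := by
  induction i with
  | zero => simp [mkState]
  | succ n ih =>
      rw [List.range_succ, List.foldl_append, ih (by omega)]
      simp only [List.foldl_cons, List.foldl_nil]
      exact step_main row n (by omega)

-- ===== VERDICT (by name: the statement is the Claim_ definition above) =====
theorem collapseRowFibonacci_spec : Claim_equal_collapseRowFibonacci := by
  intro row _
  unfold Spec_collapseRowFibonacci collapseRowFibonacci collapseRowFibonacci_alt
  rw [invA row row.length le_rfl]
  simp [mkState]
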